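-- pv_equiv track=rewrite | github.com/jahnito/bot_five_letters_helper | functions/functions.py | show_words
-- ===== SOURCE A (Python) =====
-- def show_words(words: dict[str], cols: int) -> str:
--     c = -1
--     res = []
--     mid_res = []
--     for word in words:
--         if c <= cols:
--             c += 1
--             mid_res.append(word)
--         else:
--             c = 0
--             res.append('  '.join(mid_res))
--             mid_res = [word]
--     if mid_res:
--         res.append(' '.join(mid_res))
--     return '\n'.join(res)
-- ===== SOURCE B (Python) =====
-- def show_words(words, cols):
--     ws = list(words)
--     if not ws:
--         return ''
--     size = cols + 2
--     rows = [ws[i:i + size] for i in range(0, len(ws), size)]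
--     return '\n'.join(['  '.join(r) for r in rows[:-1]] + [' '.join(rows[-1])])
-- ===== Notes on version B (the rewrite author's own statement) =====
-- stated objective: simpler
-- what changed: Replaces A's stateful counter loop (c starting at -1, lazy flush of mid_res on the next word) by chunk-then-join: slice the key list into rows of size cols+2 up front, then join non-final rows with two spaces, the final row with one space, and the lines with a newline.
-- outside the precondition, e.g. on show_words({'a': 1, 'b': 2}, -2): A returns '\na\nb', B raises ValueError
import Mathlib
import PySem

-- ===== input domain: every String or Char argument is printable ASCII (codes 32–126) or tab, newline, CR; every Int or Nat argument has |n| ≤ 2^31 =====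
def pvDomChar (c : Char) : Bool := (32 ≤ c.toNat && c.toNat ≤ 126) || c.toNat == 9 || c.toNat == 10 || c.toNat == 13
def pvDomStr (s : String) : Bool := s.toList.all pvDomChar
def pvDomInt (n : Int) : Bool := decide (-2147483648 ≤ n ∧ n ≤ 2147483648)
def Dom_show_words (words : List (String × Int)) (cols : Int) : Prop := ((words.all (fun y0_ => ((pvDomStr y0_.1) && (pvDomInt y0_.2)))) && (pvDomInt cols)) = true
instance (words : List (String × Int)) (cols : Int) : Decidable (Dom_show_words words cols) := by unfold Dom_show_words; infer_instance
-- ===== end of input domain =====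

-- B replaces A's stateful counter loop by slice-into-rows-of-(cols+2)-then-join: simpler decomposition, same cost.

-- ===== PORT A =====
-- 'for word in words' iterates the dict's keys in insertion order (duplicates collapsed to
-- their first occurrence): PySem.Set.ofList of the key list.
def show_words (words : List (String × Int)) (cols : Int) : String :=
  let keys := PySem.Set.ofList (words.map Prod.fst)
  let st := keys.foldl
    (fun (st : Int × List String × List String) word =>
      let c := st.1; let res := st.2.1; let mid_res := st.2.2
      if c ≤ cols then (c + 1, res, mid_res ++ [word])
      else (0, res ++ [PySem.Str.join "  " mid_res], [word]))
    (-1, [], [])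
  let res := if st.2.2 = [] then st.2.1 else st.2.1 ++ [PySem.Str.join " " st.2.2]
  PySem.Str.join "\n" res

-- ===== PORT B =====
def show_words_alt (words : List (String × Int)) (cols : Int) : String :=
  let ws := PySem.Set.ofList (words.map Prod.fst)
  if ws = [] then ""
  else
    let size := cols + 2
    let rows := (PySem.List.pyRange 0 ws.length size).map
      (fun i => PySem.List.slice ws (some i) (some (i + size)))
    PySem.Str.join "\n"
      ((PySem.List.slice rows none (some (-1))).map (PySem.Str.join "  ")
        ++ [PySem.Str.join " " (PySem.List.pyGetD rows (-1) [])])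

-- ===== PRECONDITION & SPEC =====
-- Pre_ excludes cols ≤ -2 with a nonempty dict: there B's own slicing raises
-- (range step cols+2 is zero or negative → ValueError / rows[-1] IndexError), while A's value
-- (a leading empty line from flushing an empty mid_res) is leftover-loop-state accident.
def Pre_show_words (words : List (String × Int)) (cols : Int) : Prop := words = [] ∨ -1 ≤ cols
instance (words : List (String × Int)) (cols : Int) : Decidable (Pre_show_words words cols) := by unfold Pre_show_words; infer_instance
def pvWitness_show_words : (List (String × Int)) × Int := ([("alpha", 1), ("beta", 2), ("gamma", 3)], 0)

def Spec_show_words (words : List (String × Int)) (cols : Int) (out : String) : Prop := out = show_words_alt words cols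
instance (words : List (String × Int)) (cols : Int) (out : String) : Decidable (Spec_show_words words cols out) := by unfold Spec_show_words; infer_instance

-- ===== CLAIM (what is proved, stated in full; the proofs are below) =====
def Claim_equal_show_words : Prop := ∀ (words : List (String × Int)) (cols : Int), Dom_show_words words cols → Pre_show_words words cols → Spec_show_words words cols (show_words words cols)

-- ===== LEMMAS AND PROOFS =====

-- greedy chunks of size s+1
def pvChunks (s : Nat) : List String → List (List String)
  | [] => []
  | x :: t => (x :: t).take (s + 1) :: pvChunks s (t.drop s)
  termination_by l => l.length
  decreasing_by simp

lemma pvChunks_nil (s : Nat) : pvChunks s [] = [] := by simp [pvChunks]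

lemma pvChunks_cons (s : Nat) (x : String) (t : List String) :
    pvChunks s (x :: t) = (x :: t).take (s + 1) :: pvChunks s (t.drop s) := by
  simp [pvChunks]

-- all rows joined with two spaces except the last, joined with one
def pvRender : List (List String) → List String
  | [] => []
  | [r] => [PySem.Str.join " " r]
  | r :: rs => PySem.Str.join "  " r :: pvRender rs

lemma pvChunks_ne_nil (s : Nat) (l : List String) (h : l ≠ []) : pvChunks s l ≠ [] := by
  cases l with
  | nil => exact absurd rfl h
  | cons a t => rw [pvChunks_cons]; simp

lemma pvChunks_append (s : Nat) (mid : List String) (rest : List String)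
    (hlen : mid.length = s + 1) :
    pvChunks s (mid ++ rest) = mid :: pvChunks s rest := by
  cases mid with
  | nil => simp at hlen
  | cons a t =>
    have ht : t.length = s := by simpa using hlen
    rw [List.cons_append, pvChunks_cons]
    have h1 : ((a :: (t ++ rest)).take (s + 1)) = a :: t := by
      simp only [List.take_succ_cons]
      rw [← ht, List.take_left]
    have h2 : (t ++ rest).drop s = rest := by rw [← ht, List.drop_left]
    rw [h1, h2]

lemma pvRender_cons (r : List String) (rs : List (List String)) (h : rs ≠ []) :
    pvRender (r :: rs) = PySem.Str.join "  " r :: pvRender rs := by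
  cases rs with
  | nil => exact absurd rfl h
  | cons b t => rfl

-- ---- A's loop computes res ++ render (chunks of mid ++ rest) ----

def pvStep (cols : Int) (st : Int × List String × List String) (word : String) :
    Int × List String × List String :=
  if st.1 ≤ cols then (st.1 + 1, st.2.1, st.2.2 ++ [word])
  else (0, st.2.1 ++ [PySem.Str.join "  " st.2.2], [word])

def pvFinish (st : Int × List String × List String) : List String :=
  if st.2.2 = [] then st.2.1 else st.2.1 ++ [PySem.Str.join " " st.2.2]

lemma pvLoopA (cols : Int) (hc : -1 ≤ cols) (ws : List String) :
    ∀ (mid res : List String), (mid.length : Int) ≤ cols + 2 →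
    pvFinish (ws.foldl (pvStep cols) ((mid.length : Int) - 1, res, mid))
      = res ++ pvRender (pvChunks (cols + 1).toNat (mid ++ ws)) := by
  induction ws with
  | nil =>
    intro mid res hm
    cases mid with
    | nil => simp [pvFinish, pvChunks_nil, pvRender]
    | cons a t =>
      have htake : ((a :: t).take ((cols + 1).toNat + 1)) = a :: t := by
        apply List.take_of_length_le; simp at hm ⊢; omega
      have hdrop : t.drop (cols + 1).toNat = [] := by
        apply List.drop_eq_nil_of_le; simp at hm ⊢; omega
      simp only [List.append_nil, List.foldl_nil, pvChunks_cons, htake, hdrop, pvChunks_nil]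
      simp [pvFinish, pvRender]
  | cons w rest ih =>
    intro mid res hm
    rw [List.foldl_cons]
    by_cases h : (mid.length : Int) - 1 ≤ cols
    · have hstep : pvStep cols ((mid.length : Int) - 1, res, mid) w
          = (((mid ++ [w]).length : Int) - 1, res, mid ++ [w]) := by
        simp [pvStep, h]
      rw [hstep, ih (mid ++ [w]) res (by simp; omega)]
      simp
    · have hlen : mid.length = (cols + 1).toNat + 1 := by omega
      have hstep : pvStep cols ((mid.length : Int) - 1, res, mid)  w
          = ((([w] : List String).length : Int) - 1, res ++ [PySem.Str.join "  " mid], [w]) := by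
        simp [pvStep, h]
      rw [hstep, ih [w] (res ++ [PySem.Str.join "  " mid]) (by simp; omega)]
      rw [show (mid ++ w :: rest) = mid ++ ([w] ++ rest) by simp,
        pvChunks_append _ _ _ hlen,
        pvRender_cons _ _ (pvChunks_ne_nil _ _ (by simp))]
      simp

-- ---- B's comprehension computes the same chunks ----

lemma pvEdivOne (x s : Int) (hs : 0 < s) (h1 : 1 ≤ x) (h2 : x ≤ s) :
    (x + s - 1) / s = 1 := by
  have hq := Int.mul_ediv_add_emod (x + s - 1) s -- q*s + r decomposition
  have hr0 : 0 ≤ (x + s - 1) % s := Int.emod_nonneg _ (by omega)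
  have hrs : (x + s - 1) % s < s := Int.emod_lt_of_pos _ hs
  set q := (x + s - 1) / s with hqd
  set r := (x + s - 1) % s with hrd
  -- s * q + r = x + s - 1, s ≤ x + s - 1 < 2s, 0 ≤ r < s ⇒ q = 1
  by_contra hne
  have hq1 : q ≤ 0 ∨ 2 ≤ q := by omega
  rcases hq1 with hq1 | hq1
  · nlinarith
  · nlinarith

lemma pvRange_pos_cons (a b s : Int) (hs : 0 < s) (hab : a < b) :
    PySem.List.pyRange a b s = a :: PySem.List.pyRange (a + s) b s := by
  rw [PySem.List.pyRange_of_pos _ _ hs, PySem.List.pyRange_of_pos _ _ hs]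
  by_cases h2 : a + s < b
  · have hN : (if a < b then ((b - a + s - 1) / s).toNat else 0)
        = (if a + s < b then ((b - (a + s) + s - 1) / s).toNat else 0) + 1 := by
      rw [if_pos hab, if_pos h2]
      have he : b - a + s - 1 = (b - (a + s) + s - 1) + 1 * s := by ring
      rw [he, Int.add_mul_ediv_right _ _ (by omega)]
      have h0 : 0 ≤ (b - (a + s) + s - 1) / s := Int.ediv_nonneg (by omega) (by omega)
      omega
    rw [hN, List.range_succ_eq_map]
    simp only [List.map_cons, List.map_map, Nat.cast_zero, mul_zero, add_zero]
    congr 1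
    apply List.map_congr_left
    intro k _
    simp only [Function.comp_apply]
    push_cast
    ring
  · have hN : (if a < b then ((b - a + s - 1) / s).toNat else 0) = 1 := by
      rw [if_pos hab]
      rw [pvEdivOne (b - a) s hs (by omega) (by omega)]
      rfl
    rw [hN, if_neg h2]
    simp
  
lemma pvRange_shift (a b s : Int) (hs : 0 < s) :
    PySem.List.pyRange (a + s) b s = (PySem.List.pyRange a (b - s) s).map (· + s) := by
  rw [PySem.List.pyRange_of_pos _ _ hs, PySem.List.pyRange_of_pos _ _ hs, List.map_map]
  have hcnt : b - (a + s) + s - 1 = b - s - a + s - 1 := by ring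
  have hcond : (a + s < b) ↔ (a < b - s) := by omega
  rw [hcnt]
  congr 1
  · funext k; simp only [Function.comp_apply]; ring
  · congr 1; simp only [hcond]

lemma pvRowsB (s : Nat) (ws : List String) :
    ((PySem.List.pyRange 0 ws.length ((s : Int) + 1)).map
      (fun i => PySem.List.slice ws (some i) (some (i + ((s : Int) + 1)))))
      = pvChunks s ws := by
  induction ws using pvChunks.induct s with
  | case1 =>
    rw [pvChunks_nil, PySem.List.pyRange_of_pos _ _ (by omega)]
    simp
  | case2 x t ih =>
    have hs1 : (0 : Int) < (s : Int) + 1 := by omega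
    have hn : (0 : Int) < ((x :: t).length : Int) := by simp
    rw [pvRange_pos_cons _ _ _ hs1 hn, List.map_cons]
    have hhead : PySem.List.slice (x :: t) (some 0) (some (0 + ((s : Int) + 1)))
        = (x :: t).take (s + 1) := by
      have : (0 : Int) + ((s : Int) + 1) = ((s + 1 : Nat) : Int) := by push_cast; ring
      rw [this, show (0 : Int) = ((0 : Nat) : Int) by simp, PySem.List.slice_natCast]
      simp
    rw [hhead, pvChunks_cons]
    congr 1
    have hsh := pvRange_shift 0 (((x :: t).length : Int)) ((s : Int) + 1) hs1
    rw [zero_add] at hsh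
    rw [zero_add, hsh, List.map_map]
    have hdrop : (t.drop s) = (x :: t).drop (s + 1) := by simp
    have hlen : ((x :: t).length : Int) - ((s : Int) + 1) ≤ ((t.drop s).length : Int)
        ∧ ((t.drop s).length : Int) ≤ ((x :: t).length : Int) - ((s : Int) + 1)
        ∨ ((x :: t).length : Int) - ((s : Int) + 1) < 0 := by
      simp; omega
    by_cases hts : s ≤ t.length
    · have heq : ((x :: t).length : Int) - ((s : Int) + 1) = ((t.drop s).length : Int) := by
        simp; omega
      rw [heq, ← ih]
      apply List.map_congr_left
      intro i hi
      have hi0 : 0 ≤ i := by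
        rcases (PySem.List.mem_pyRange_iff_of_pos hs1 i).1 hi with ⟨h1, _, _⟩
        exact h1
      simp only [Function.comp_apply]
      obtain ⟨n, rfl⟩ : ∃ n : Nat, i = (n : Int) := ⟨i.toNat, by omega⟩
      rw [show (n : Int) + ((s : Int) + 1) = ((n + (s + 1) : Nat) : Int) by push_cast; ring]
      rw [show ((n + (s + 1) : Nat) : Int) + ((s : Int) + 1)
            = ((n + (s + 1) + (s + 1) : Nat) : Int) by push_cast; ring]
      rw [PySem.List.slice_natCast, PySem.List.slice_natCast, List.drop_drop]
      rw [show n + (s + 1) + (s + 1) - (n + (s + 1)) = s + 1 from by omega,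
        show n + (s + 1) - n = s + 1 from by omega,
        show n + (s + 1) = (n + s) + 1 from by omega,
        List.drop_succ_cons, Nat.add_comm n s]
    · -- tail is empty on both sides
      have h1 : PySem.List.pyRange 0 (((x :: t).length : Int) - ((s : Int) + 1)) ((s : Int) + 1) = [] := by
        rw [PySem.List.pyRange_of_pos _ _ hs1, if_neg (by simp; omega)]
        simp
      have h2 : t.drop s = [] := List.drop_eq_nil_of_le (by omega)
      rw [h1, ← ih, h2]
      simp [PySem.List.pyRange_of_pos _ _ hs1]

lemma pvJoinRows (rows : List (List String)) (h : rows ≠ []) :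
    (PySem.List.slice rows none (some (-1))).map (PySem.Str.join "  ")
      ++ [PySem.Str.join " " (PySem.List.pyGetD rows (-1) [])]
      = pvRender rows := by
  rw [PySem.List.slice_to_neg_one, PySem.List.pyGetD_neg_one rows [] h]
  induction rows with
  | nil => exact absurd rfl h
  | cons r rs ih =>
    cases rs with
    | nil => simp [pvRender]
    | cons b t =>
      rw [List.dropLast_cons_of_ne_nil (by simp), List.getLast_cons (by simp),
        pvRender_cons _ _ (by simp)]
      simp only [List.map_cons, List.cons_append]
      rw [ih (by simp)]

-- ===== VERDICT (by name: the statement is the Claim_ definition above) =====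
theorem show_words_spec : Claim_equal_show_words := by
  intro words cols _hDom hPre
  unfold Spec_show_words show_words show_words_alt
  simp only []
  set ws := PySem.Set.ofList (words.map Prod.fst) with hws
  by_cases hempty : ws = []
  · rw [hempty, if_pos rfl]
    simp [PySem.Str.join]
  · have hcols : -1 ≤ cols := by
      rcases hPre with h | h
      · exfalso; apply hempty; rw [hws, h]; rfl
      · exact h
    have hstep : (fun (st : Int × List String × List String) word =>
        if st.1 ≤ cols then (st.1 + 1, st.2.1, st.2.2 ++ [word])
        else (0, st.2.1 ++ [PySem.Str.join "  " st.2.2], [word])) = pvStep cols := by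
      funext st word; simp [pvStep]
    have hA := pvLoopA cols hcols ws [] [] (by simp; omega)
    simp only [List.length_nil, Nat.cast_zero, zero_sub, List.nil_append] at hA
    have hfin : ∀ X : Int × List String × List String,
        (if X.2.2 = [] then X.2.1 else X.2.1 ++ [PySem.Str.join " " X.2.2]) = pvFinish X :=
      fun _ => rfl
    have hsize : cols + 2 = ((cols + 1).toNat : Int) + 1 := by omega
    rw [if_neg hempty, hstep, hfin, hA, hsize, pvRowsB (cols + 1).toNat ws,
      pvJoinRows _ (pvChunks_ne_nil _ _ hempty)]
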